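-- pv_equiv track=rewrite | github.com/marinacler/MTLS | Projects/general_scripts/parser_module.py | input_for_testing
-- ===== SOURCE A (Python) =====
-- def input_for_testing(dictionary,slidwindow): # parsed dictionary
--     testinginput=[]
--     flankingseq= [0, 0, 0, 0, 0, 0, 0, 0, 0, 0, 0, 0, 0, 0, 0, 0, 0, 0, 0, 0]
--     for proteins in dictionary.keys():
--         flankinglist=[]
--         for i in range(int(slidwindow/2)):
--             flankinglist=[flankingseq]+flankinglist
--         flankinglist=flankinglist+(dictionary.get(proteins)[0])
--         for i in range(int(slidwindow/2)):
--             flankinglist=flankinglist+[flankingseq]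
--         #Sliding windows
--         for j in range(int(slidwindow/2),(len(flankinglist)-int(slidwindow/2))):
--             slidingsequence=flankinglist[(j-int(slidwindow/2)):(j+int(slidwindow/2)+1)]
--             flat_list = [item for sublist in slidingsequence for item in sublist]
--             testinginput.append(flat_list)
--     return (testinginput)
-- ===== SOURCE B (Python) =====
-- def input_for_testing(dictionary, slidwindow):
--     half = int(slidwindow / 2)
--     zeros = [0] * 20
--     out = []
--     for value in dictionary.values():
--         seq = value[0]
--         n = len(seq)
--         for i in range(n):
--             row = []
--             for off in range(-half, half + 1):
--                 src = i + off
--                 row.extend(seq[src] if 0 <= src < n else zeros)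
--             out.append(row)
--     return out
-- ===== Notes on version B (the rewrite author's own statement) =====
-- stated objective: simpler
-- what changed: B drops A's materialized zero-padded flanking list (built by repeated list concatenation) and its re-slicing per window: it builds each flattened row directly per sequence position from an offset range, substituting the 20-zero flank wherever the offset falls outside the sequence.
-- outside the precondition, e.g. on input_for_testing({'p': [[[1, 2], [3, 4]]]}, -4): A returns [[], [], [], [], [], []], B returns [[], []]
import Mathlib
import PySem

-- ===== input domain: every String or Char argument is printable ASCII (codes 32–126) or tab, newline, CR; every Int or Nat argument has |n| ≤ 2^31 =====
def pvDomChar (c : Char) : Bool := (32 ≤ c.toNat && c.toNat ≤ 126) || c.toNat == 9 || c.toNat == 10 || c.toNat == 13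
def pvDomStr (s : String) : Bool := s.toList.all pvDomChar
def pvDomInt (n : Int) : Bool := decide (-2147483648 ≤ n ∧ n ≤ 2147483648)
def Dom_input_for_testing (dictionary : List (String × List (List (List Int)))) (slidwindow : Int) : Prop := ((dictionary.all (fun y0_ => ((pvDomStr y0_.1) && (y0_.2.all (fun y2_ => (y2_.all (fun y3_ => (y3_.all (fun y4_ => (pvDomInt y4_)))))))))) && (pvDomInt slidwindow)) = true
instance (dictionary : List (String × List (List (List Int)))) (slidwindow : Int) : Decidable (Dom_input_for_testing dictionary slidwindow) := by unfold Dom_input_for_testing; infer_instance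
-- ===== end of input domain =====

-- B drops A's padded flankinglist + re-slicing and builds each window row directly per position
-- (objective: simpler decomposition; no speed claim).

-- ===== PORT A =====
def input_for_testing (dictionary : List (String × List (List (List Int)))) (slidwindow : Int) : List (List Int) :=
  -- the dict argument is realised as a Python dict: PySem.Dict.ofList (a later duplicate key overwrites)
  let pydict := PySem.Dict.ofList dictionary
  let flankingseq : List Int := [0, 0, 0, 0, 0, 0, 0, 0, 0, 0, 0, 0, 0, 0, 0, 0, 0, 0, 0, 0]
  -- int(slidwindow/2): exact truncating division on the tested domain (|slidwindow| ≤ 2^31 < 2^53)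
  let half : Int := PySem.Int.truncdiv slidwindow 2
  (PySem.Dict.keys pydict).foldl (fun testinginput proteins =>
    let flankinglist : List (List Int) :=
      (PySem.List.pyRange 0 half 1).foldl (fun fl _ => [flankingseq] ++ fl) []
    -- dictionary.get(proteins)[0]: Pre_ guarantees the value list is nonempty (else Python raises IndexError)
    let flankinglist := flankinglist ++
      ((PySem.List.pyGet? ((PySem.Dict.get? pydict proteins).getD []) 0).getD [])
    let flankinglist :=
      (PySem.List.pyRange 0 half 1).foldl (fun fl _ => fl ++ [flankingseq]) flankinglist
    (PySem.List.pyRange half (PySem.List.len flankinglist - half) 1).foldl (fun testinginput j =>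
      let slidingsequence := PySem.List.slice flankinglist (some (j - half)) (some (j + half + 1))
      let flat_list := slidingsequence.flatten
      testinginput ++ [flat_list]) testinginput) []

-- ===== PORT B =====
def input_for_testing_alt (dictionary : List (String × List (List (List Int)))) (slidwindow : Int) : List (List Int) :=
  let half : Int := PySem.Int.truncdiv slidwindow 2
  let zeros : List Int := List.replicate 20 0
  (PySem.Dict.values (PySem.Dict.ofList dictionary)).foldl (fun out value =>
    let seq := (PySem.List.pyGet? value 0).getD []
    let n := PySem.List.len seq
    out ++ (List.range seq.length).map (fun (i : Nat) =>
      (PySem.List.pyRange (-half) (half + 1) 1).foldl (fun row off =>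
        row ++ (if 0 ≤ (i : Int) + off ∧ (i : Int) + off < n
                then (PySem.List.pyGet? seq ((i : Int) + off)).getD []
                else zeros)) [])) []

-- ===== PRECONDITION & SPEC =====
-- Pre_ excludes slidwindow ≤ -2 (negative window half-width; A's negative slice bounds then yield rows of
-- accidental shape and count) and dicts with an empty value list (there A raises IndexError on value[0]).
def Pre_input_for_testing (dictionary : List (String × List (List (List Int)))) (slidwindow : Int) : Prop :=
  -1 ≤ slidwindow ∧ ∀ v ∈ PySem.Dict.values (PySem.Dict.ofList dictionary), v ≠ []
instance (dictionary : List (String × List (List (List Int)))) (slidwindow : Int) : Decidable (Pre_input_for_testing dictionary slidwindow) := by unfold Pre_input_for_testing; infer_instance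

def pvWitness_input_for_testing : (List (String × List (List (List Int)))) × Int :=
  ([("p", [[[1, 2], [3, 4]]])], 3)

def Spec_input_for_testing (dictionary : List (String × List (List (List Int)))) (slidwindow : Int) (out : List (List Int)) : Prop := out = input_for_testing_alt dictionary slidwindow
instance (dictionary : List (String × List (List (List Int)))) (slidwindow : Int) (out : List (List Int)) : Decidable (Spec_input_for_testing dictionary slidwindow out) := by unfold Spec_input_for_testing; infer_instance

-- ===== CLAIM (what is proved, stated in full; the proofs are below) =====
def Claim_equal_input_for_testing : Prop := ∀ (dictionary : List (String × List (List (List Int)))) (slidwindow : Int), Dom_input_for_testing dictionary slidwindow → Pre_input_for_testing dictionary slidwindow → Spec_input_for_testing dictionary slidwindow (input_for_testing dictionary slidwindow)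

-- ===== LEMMAS AND PROOFS =====

-- A's first padding loop: prepending a constant once per range element is replicate-prepend.
theorem pvFoldlPrependConst {α β : Type} (c : α) :
    ∀ (l : List β) (acc : List α),
      l.foldl (fun fl _ => [c] ++ fl) acc = List.replicate l.length c ++ acc := by
  intro l
  induction l with
  | nil => intro acc; simp
  | cons x xs ih =>
    intro acc
    rw [List.foldl_cons, ih, List.length_cons, List.replicate_succ']
    simp

-- The core row identity: the window sliced out of the padded list equals the directly built row.
theorem pvRowEq (H : Nat) (seq : List (List Int)) (z : List Int) (i : Nat) (hi : i < seq.length) :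
    (PySem.List.slice ((List.replicate H z ++ seq) ++ List.replicate H z)
        (some ((H : Int) + (i : Int) - (H : Int))) (some ((H : Int) + (i : Int) + (H : Int) + 1))).flatten
      = (PySem.List.pyRange (-(H : Int)) ((H : Int) + 1) 1).flatMap (fun off =>
          if 0 ≤ (i : Int) + off ∧ (i : Int) + off < ((seq.length : Nat) : Int)
          then (PySem.List.pyGet? seq ((i : Int) + off)).getD [] else z) := by
  have e1 : (H : Int) + (i : Int) - (H : Int) = ((i : Nat) : Int) := by ring
  have e2 : (H : Int) + (i : Int) + (H : Int) + 1 = ((i + (2 * H + 1) : Nat) : Int) := by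
    push_cast; ring
  rw [e1, e2, PySem.List.slice_natCast]
  have e3 : i + (2 * H + 1) - i = 2 * H + 1 := by omega
  rw [e3, PySem.List.pyRange_one]
  have e4 : ((H : Int) + 1 - -(H : Int)).toNat = 2 * H + 1 := by omega
  rw [e4, List.flatMap_map, List.flatMap_def]
  congr 1
  apply List.ext_getElem
  · simp
    omega
  · intro k hk1 hk2
    have hk : k < 2 * H + 1 := by simpa using hk2
    simp only [List.getElem_take, List.getElem_drop, List.getElem_map, List.getElem_range]
    by_cases h1 : i + k < H
    · rw [if_neg (by omega)]
      rw [List.getElem_append_left (by simp; omega), List.getElem_append_left (by simp; omega),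
          List.getElem_replicate]
    · by_cases h2 : i + k < H + seq.length
      · rw [if_pos (by constructor <;> omega)]
        have ec : ((i : Int) + (-(H : Int) + (k : Int))) = ((i + k - H : Nat) : Int) := by omega
        rw [ec, PySem.List.pyGet?_natCast,
            List.getElem?_eq_getElem (by omega), Option.getD_some]
        rw [List.getElem_append_left (by simp; omega), List.getElem_append_right (by simp; omega)]
        simp
      · rw [if_neg (by omega)]
        rw [List.getElem_append_right (by simp; omega), List.getElem_replicate]

-- A's per-protein contribution equals B's per-protein contribution, for the same seq and accumulator.
theorem pvBodyEq (H : Nat) (z20 : List Int) (seq : List (List Int)) (acc : List (List Int)) :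
    (PySem.List.pyRange (H : Int)
        (((((List.replicate H z20 ++ seq) ++ List.replicate H z20).length : Nat) : Int) - (H : Int)) 1).foldl
      (fun a j =>
        a ++ [(PySem.List.slice ((List.replicate H z20 ++ seq) ++ List.replicate H z20)
                (some (j - (H : Int))) (some (j + (H : Int) + 1))).flatten]) acc
      = acc ++ (List.range seq.length).map (fun (i : Nat) =>
          (PySem.List.pyRange (-(H : Int)) ((H : Int) + 1) 1).foldl (fun row off =>
            row ++ (if 0 ≤ (i : Int) + off ∧ (i : Int) + off < ((seq.length : Nat) : Int)
                    then (PySem.List.pyGet? seq ((i : Int) + off)).getD []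
                    else z20)) []) := by
  rw [PySem.List.foldl_append_singleton_eq_map]
  have hlen : (((((List.replicate H z20 ++ seq) ++ List.replicate H z20).length : Nat) : Int)) - (H : Int)
      = (H : Int) + (seq.length : Int) := by
    simp
    omega
  rw [hlen, PySem.List.pyRange_one]
  have ht : ((H : Int) + (seq.length : Int) - (H : Int)).toNat = seq.length := by omega
  rw [ht, List.map_map]
  congr 1
  apply List.map_congr_left
  intro i hi
  have hi' : i < seq.length := List.mem_range.mp hi
  simp only [Function.comp_apply]
  rw [PySem.List.foldl_append_eq_flatMap, List.nil_append]
  exact pvRowEq H seq z20 i hi'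

-- ===== VERDICT (by name: the statement is the Claim_ definition above) =====
theorem input_for_testing_spec : Claim_equal_input_for_testing := by
  intro dictionary slidwindow _ hpre
  unfold Spec_input_for_testing
  obtain ⟨hs, -⟩ := hpre
  have h0 : 0 ≤ PySem.Int.truncdiv slidwindow 2 := by
    unfold PySem.Int.truncdiv
    rcases lt_or_ge slidwindow 0 with hneg | hpos
    · have hone : slidwindow = -1 := by omega
      subst hone; decide
    · exact Int.tdiv_nonneg hpos (by norm_num)
  obtain ⟨H, hHc⟩ : ∃ H : Nat, PySem.Int.truncdiv slidwindow 2 = (H : Int) :=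
    ⟨(PySem.Int.truncdiv slidwindow 2).toNat, by omega⟩
  simp only [input_for_testing, input_for_testing_alt]
  rw [hHc]
  rw [show PySem.Dict.keys (PySem.Dict.ofList dictionary)
        = (PySem.Dict.ofList dictionary).items.map (fun p => p.1) from rfl,
      show PySem.Dict.values (PySem.Dict.ofList dictionary)
        = (PySem.Dict.ofList dictionary).items.map (fun p => p.2) from rfl,
      List.foldl_map, List.foldl_map]
  apply PySem.List.foldl_congr_mem
  intro acc p hp
  have hg : PySem.Dict.get? (PySem.Dict.ofList dictionary) p.1 = some p.2 :=
    PySem.Dict.get?_of_mem_items _ (by simpa using hp) (PySem.Dict.nodup_keys_ofList _)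
  rw [hg]
  simp only [Option.getD_some, PySem.List.len_eq]
  rw [pvFoldlPrependConst,
      PySem.List.foldl_append_singleton_eq_map
        (fun _ => ([0, 0, 0, 0, 0, 0, 0, 0, 0, 0, 0, 0, 0, 0, 0, 0, 0, 0, 0, 0] : List Int))]
  simp only [List.map_const', PySem.List.length_pyRange_one, Int.sub_zero, Int.toNat_natCast,
    List.append_nil,
    show (List.replicate 20 (0 : Int))
        = [0, 0, 0, 0, 0, 0, 0, 0, 0, 0, 0, 0, 0, 0, 0, 0, 0, 0, 0, 0] from rfl]
  exact pvBodyEq H [0, 0, 0, 0, 0, 0, 0, 0, 0, 0, 0, 0, 0, 0, 0, 0, 0, 0, 0, 0]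
    ((PySem.List.pyGet? p.2 0).getD []) acc
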